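-- pv_equiv track=rewrite | github.com/IBM/data-prep-kit | transforms/code/syntactic_concept_extractor/python/src/offline-customizations/llm_interaction.py | gen_combined_strings
-- ===== SOURCE A (Python) =====
-- def gen_combined_strings(list_str):
--     combined_strings = []
--     combined_string = "\nLibrary,Language,Category\n"
--     for idx, entry in enumerate(list_str, start=1):
--         entry_string = ",".join([f"{value}" for key, value in entry.items()])
--         combined_string += f"{entry_string}\n"
--         if idx % 30 == 0 or idx == len(list_str):  # Ensure to include the last batch
--             combined_strings.append(combined_string)
--             combined_string = "Library,Language,Category\n"
--     return combined_strings
-- ===== SOURCE B (Python) =====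
-- def gen_combined_strings(list_str):
--     rows = [",".join(f"{value}" for value in entry.values()) for entry in list_str]
--     combined_strings = []
--     for i in range(0, len(rows), 30):
--         header = "\nLibrary,Language,Category\n" if i == 0 else "Library,Language,Category\n"
--         combined_strings.append(header + "".join(r + "\n" for r in rows[i:i+30]))
--     return combined_strings
-- ===== Notes on version B (the rewrite author's own statement) =====
-- stated objective: alternative
-- what changed: B first renders the flat list of per-entry CSV rows, then emits fixed-size windows of 30 rows via range(0, len, 30) with a per-window header, replacing A's single incremental accumulator with a modulo/last-index flush.
import Mathlib
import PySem

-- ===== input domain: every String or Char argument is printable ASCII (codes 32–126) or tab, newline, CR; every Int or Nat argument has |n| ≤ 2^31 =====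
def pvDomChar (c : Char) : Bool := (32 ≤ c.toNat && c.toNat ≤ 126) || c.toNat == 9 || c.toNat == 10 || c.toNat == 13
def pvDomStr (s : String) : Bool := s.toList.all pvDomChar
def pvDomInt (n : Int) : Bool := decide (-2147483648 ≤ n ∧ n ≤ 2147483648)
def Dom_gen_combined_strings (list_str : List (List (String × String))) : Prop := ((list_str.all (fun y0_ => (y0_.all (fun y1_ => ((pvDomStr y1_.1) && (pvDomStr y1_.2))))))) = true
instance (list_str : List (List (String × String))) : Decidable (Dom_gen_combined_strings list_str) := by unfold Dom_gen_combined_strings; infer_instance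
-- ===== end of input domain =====

-- B builds the per-entry CSV rows first and then emits fixed-size windows of 30,
-- instead of A's incremental accumulator with a modulo flush (objective: alternative decomposition).

-- shared row rendering: ",".join(f"{value}" for value in entry.values())
def pvRow (entry : List (String × String)) : String :=
  PySem.Str.join "," (entry.map (fun kv => kv.2))

-- ===== PORT A =====
def gen_combined_strings (list_str : List (List (String × String))) : List String :=
  ((PySem.List.enumerate list_str 1).foldl
    (fun (st : List String × String) (p : Int × List (String × String)) =>
      let entry_string := pvRow p.2
      let combined_string := st.2 ++ (entry_string ++ "\n")
      if PySem.Int.mod p.1 30 == 0 || p.1 == (list_str.length : Int)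
      then (st.1 ++ [combined_string], "Library,Language,Category\n")
      else (st.1, combined_string))
    ([], "\nLibrary,Language,Category\n")).1

-- ===== PORT B =====
def gen_combined_strings_alt (list_str : List (List (String × String))) : List String :=
  let rows := list_str.map pvRow
  (PySem.List.pyRange 0 (rows.length : Int) 30).foldl
    (fun (out : List String) (i : Int) =>
      let header := if i == 0 then "\nLibrary,Language,Category\n" else "Library,Language,Category\n"
      out ++ [header ++ PySem.Str.join "" ((PySem.List.slice rows (some i) (some (i + 30))).map (fun r => r ++ "\n"))])
    []

-- ===== PRECONDITION & SPEC =====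
def Spec_gen_combined_strings (list_str : List (List (String × String))) (out : List String) : Prop := out = gen_combined_strings_alt list_str
instance (list_str : List (List (String × String))) (out : List String) : Decidable (Spec_gen_combined_strings list_str out) := by unfold Spec_gen_combined_strings; infer_instance

-- ===== CLAIM (what is proved, stated in full; the proofs are below) =====
def Claim_equal_gen_combined_strings : Prop := ∀ (list_str : List (List (String × String))), Dom_gen_combined_strings list_str → Spec_gen_combined_strings list_str (gen_combined_strings list_str)

-- ===== LEMMAS AND PROOFS =====

-- the string a finished batch holds: rows appended one by one, each with a trailing newline
def pvCat (cur : String) (l : List String) : String :=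
  l.foldl (fun s r => s ++ (r ++ "\n")) cur

-- the result described chunk-wise: batches of 30 rows, later batches headed without the leading newline
def pvChunks : String → List String → List String
  | _, [] => []
  | cur, r :: rs =>
      pvCat cur (r :: rs.take 29) :: pvChunks "Library,Language,Category\n" (rs.drop 29)
  termination_by _ rows => rows.length
  decreasing_by simp

-- A's loop state described row-wise: j rows of the current batch already taken
def pvState : Nat → String → List String → List String
  | _, _, [] => []
  | j, cur, r :: rs =>
      if j + 1 = 30 ∨ rs = [] then
        (cur ++ (r ++ "\n")) :: pvState 0 "Library,Language,Category\n" rs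
      else pvState (j + 1) (cur ++ (r ++ "\n")) rs

lemma chunks_unfold (cur : String) (rows : List String) :
    pvChunks cur rows =
      if rows = [] then []
      else pvCat cur (rows.take 30) :: pvChunks "Library,Language,Category\n" (rows.drop 30) := by
  cases rows with
  | nil => rw [pvChunks]; simp
  | cons r rs => rw [pvChunks]; simp

lemma join_empty_flatten (parts : List (List Char)) :
    PySem.Chars.join [] parts = parts.flatten := by
  induction parts with
  | nil => simp [PySem.Chars.join_nil]
  | cons p rest ih =>
    cases rest with
    | nil => simp [PySem.Chars.join_singleton]
    | cons q r2 => rw [PySem.Chars.join_cons_cons]; simp_all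

lemma pvCat_toList (l : List String) : ∀ (h : String),
    (pvCat h l).toList = h.toList ++ (l.map (fun r => r.toList ++ "\n".toList)).flatten := by
  induction l with
  | nil => intro h; simp [pvCat]
  | cons r rs ih =>
    intro h
    simp only [pvCat, List.foldl_cons] at *
    rw [ih (h ++ (r ++ "\n"))]
    simp [String.toList_append]

lemma cat_eq (l : List String) (h : String) :
    pvCat h l = h ++ PySem.Str.join "" ((l.map (fun r => r ++ "\n"))) := by
  apply String.toList_inj.mp
  rw [pvCat_toList, String.toList_append, PySem.Str.toList_join,
    show ("".toList : List Char) = [] from rfl, join_empty_flatten]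
  congr 1
  rw [List.map_map]
  congr 1
  apply List.map_congr_left
  intro r _
  simp [Function.comp, String.toList_append]

lemma pyRange30_nil (a b : Int) (h : b ≤ a) : PySem.List.pyRange a b 30 = [] := by
  rw [PySem.List.pyRange_of_pos _ _ (by norm_num)]
  simp [show ¬ a < b by omega]

lemma pyRange30_cons (a b : Int) (h : a < b) :
    PySem.List.pyRange a b 30 = a :: PySem.List.pyRange (a + 30) b 30 := by
  rw [PySem.List.pyRange_of_pos _ _ (by norm_num), PySem.List.pyRange_of_pos _ _ (by norm_num)]
  by_cases h2 : a + 30 < b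
  · rw [if_pos h, if_pos h2,
      show ((b - a + 30 - 1) / 30).toNat = ((b - (a + 30) + 30 - 1) / 30).toNat + 1 by omega,
      List.range_succ_eq_map]
    simp only [List.map_cons, List.map_map, Nat.cast_zero, mul_zero, add_zero]
    congr 1
    apply List.map_congr_left
    intro k _
    simp only [Function.comp_apply]
    push_cast
    ring
  · rw [if_pos h, if_neg h2, show ((b - a + 30 - 1) / 30).toNat = 1 by omega]
    simp

-- A's fold, started mid-run after idx0 processed rows, yields pvState at phase idx0 % 30
lemma foldA_eq (rows : List (List (String × String))) : ∀ (idx0 : Nat) (acc : List String) (cur : String) (n : Int),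
    n = (idx0 : Int) + rows.length →
    ((PySem.List.enumerate rows ((idx0 : Int) + 1)).foldl
      (fun (st : List String × String) (p : Int × List (String × String)) =>
        let entry_string := pvRow p.2
        let combined_string := st.2 ++ (entry_string ++ "\n")
        if PySem.Int.mod p.1 30 == 0 || p.1 == n
        then (st.1 ++ [combined_string], "Library,Language,Category\n")
        else (st.1, combined_string))
      (acc, cur)).1
    = acc ++ pvState (idx0 % 30) cur (rows.map pvRow) := by
  induction rows with
  | nil => intro idx0 acc cur n _; simp [PySem.List.enumerate_nil, pvState]
  | cons r rs ih =>
    intro idx0 acc cur n hn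
    rw [PySem.List.enumerate_cons, List.foldl_cons]
    simp only []
    have hmap : (r :: rs).map pvRow = pvRow r :: rs.map pvRow := rfl
    rw [hmap]
    by_cases hcond : idx0 % 30 + 1 = 30 ∨ rs = []
    · have hb : (PySem.Int.mod ((idx0 : Int) + 1) 30 == 0 || ((idx0 : Int) + 1 == n)) = true := by
        rcases hcond with hj | hrs
        · rw [PySem.Int.mod, Int.fmod_eq_emod]; simp; omega
        · subst hrs; simp at hn; simp [hn]
      rw [hb]
      simp only [if_true]
      have : ((idx0 : Int) + 1) + 1 = ((idx0 + 1 : Nat) : Int) + 1 := by push_cast; ring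
      rw [this, ih (idx0 + 1) (acc ++ [cur ++ (pvRow r ++ "\n")]) _ n (by simp at hn ⊢; omega)]
      rw [pvState]
      rw [if_pos (by simpa using hcond)]
      rcases hcond with hj | hrs
      · rw [show (idx0 + 1) % 30 = 0 by omega]
        simp
      · subst hrs; simp [pvState]
    · push_neg at hcond
      obtain ⟨hj, hrs⟩ := hcond
      have hb : (PySem.Int.mod ((idx0 : Int) + 1) 30 == 0 || ((idx0 : Int) + 1 == n)) = false := by
        have h1 : (PySem.Int.mod ((idx0 : Int) + 1) 30 == 0) = false := by
          rw [PySem.Int.mod, Int.fmod_eq_emod]; simp; omega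
        have h2 : (((idx0 : Int) + 1) == n) = false := by
          have : rs.length ≠ 0 := fun h => hrs (List.eq_nil_of_length_eq_zero h)
          simp at hn ⊢; omega
        rw [h1, h2]; rfl
      rw [hb]
      simp only [Bool.false_eq_true, if_false]
      have : ((idx0 : Int) + 1) + 1 = ((idx0 + 1 : Nat) : Int) + 1 := by push_cast; ring
      rw [this, ih (idx0 + 1) acc _ n (by simp at hn ⊢; omega)]
      rw [pvState]
      rw [if_neg (by simp [hrs]; omega)]
      rw [show (idx0 + 1) % 30 = idx0 % 30 + 1 by omega]

-- A's loop state at phase j < 30 is the chunk decomposition with 30 - j rows left in the open batch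
lemma state_eq (rows : List String) : ∀ (j : Nat) (cur : String), j < 30 →
    pvState j cur rows =
      if rows = [] then []
      else pvCat cur (rows.take (30 - j)) :: pvChunks "Library,Language,Category\n" (rows.drop (30 - j)) := by
  induction rows with
  | nil => intro j cur _; simp [pvState]
  | cons r rs ih =>
    intro j cur hj
    rw [pvState]
    by_cases hcond : j + 1 = 30 ∨ rs = []
    · rw [if_pos hcond]
      rcases hcond with hj30 | hrs
      · rw [ih 0 _ (by omega), ← chunks_unfold]
        rw [if_neg (List.cons_ne_nil r rs), show 30 - j = 1 by omega]
        simp [pvCat]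
      · subst hrs
        rw [if_neg (List.cons_ne_nil r []), show (30 - j) = (29 - j) + 1 by omega]
        simp [List.take_succ_cons, List.drop_succ_cons, pvCat, pvState, chunks_unfold]
    · push_neg at hcond
      obtain ⟨hj30, hrs⟩ := hcond
      rw [if_neg (by simp [hj30, hrs])]
      rw [ih (j + 1) _ (by omega)]
      rw [if_neg hrs, if_neg (List.cons_ne_nil r rs)]
      rw [show 30 - j = (30 - (j + 1)) + 1 by omega]
      simp [pvCat, List.take_succ_cons, List.drop_succ_cons]

-- B's fold over the remaining window starts, k windows already emitted
lemma foldB_eq : ∀ (fuel : Nat) (rows : List String) (k : Nat) (acc : List String),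
    rows.length ≤ 30 * k + fuel →
    ((PySem.List.pyRange ((30 * k : Nat) : Int) (rows.length : Int) 30).foldl
      (fun (out : List String) (i : Int) =>
        let header := if i == 0 then "\nLibrary,Language,Category\n" else "Library,Language,Category\n"
        out ++ [header ++ PySem.Str.join "" ((PySem.List.slice rows (some i) (some (i + 30))).map (fun r => r ++ "\n"))])
      acc)
    = acc ++ pvChunks (if k = 0 then "\nLibrary,Language,Category\n" else "Library,Language,Category\n") (rows.drop (30 * k)) := by
  intro fuel
  induction fuel with
  | zero =>
    intro rows k acc hle
    rw [pyRange30_nil _ _ (by exact_mod_cast hle.trans (by omega))]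
    rw [List.drop_eq_nil_of_le (by omega)]
    simp [pvChunks]
  | succ f ih =>
    intro rows k acc hle
    by_cases hlt : rows.length ≤ 30 * k
    · rw [pyRange30_nil _ _ (by exact_mod_cast hlt)]
      rw [List.drop_eq_nil_of_le hlt]
      simp [pvChunks]
    · push_neg at hlt
      rw [pyRange30_cons _ _ (by exact_mod_cast hlt), List.foldl_cons]
      simp only []
      have hslice : PySem.List.slice rows (some ((30 * k : Nat) : Int)) (some (((30 * k : Nat) : Int) + 30)) =
          (rows.drop (30 * k)).take 30 := by
        have := PySem.List.slice_natCast_add rows (30 * k) 30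
        simpa using this
      rw [hslice]
      have hstep : ((30 * k : Nat) : Int) + 30 = ((30 * (k + 1) : Nat) : Int) := by push_cast; ring
      rw [hstep, ih rows (k + 1) _ (by omega)]
      have hhdr : (if ((30 * k : Nat) : Int) == 0 then "\nLibrary,Language,Category\n" else "Library,Language,Category\n")
          = (if k = 0 then "\nLibrary,Language,Category\n" else "Library,Language,Category\n") := by
        rcases Nat.eq_zero_or_pos k with hk | hk
        · subst hk; simp
        · rw [if_neg (by simp; omega), if_neg (by omega)]
      rw [hhdr]
      have hne : rows.drop (30 * k) ≠ [] := by
        intro hnil; rw [List.drop_eq_nil_iff] at hnil; omega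
      rw [chunks_unfold _ (rows.drop (30 * k)), if_neg hne]
      rw [← cat_eq]
      simp only [if_neg (Nat.succ_ne_zero k), List.drop_drop, List.append_assoc, List.singleton_append]
      rw [show 30 * k + 30 = 30 * (k + 1) by ring]

-- ===== VERDICT (by name: the statement is the Claim_ definition above) =====
theorem gen_combined_strings_spec : Claim_equal_gen_combined_strings := by
  intro l _
  unfold Spec_gen_combined_strings gen_combined_strings gen_combined_strings_alt
  have hA := foldA_eq l 0 [] "\nLibrary,Language,Category\n" (l.length : Int) (by simp)
  simp only [Nat.cast_zero, zero_add, Nat.zero_mod, List.nil_append] at hA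
  rw [hA]
  have hB := foldB_eq (l.map pvRow).length (l.map pvRow) 0 [] (by omega)
  simp only [Nat.mul_zero, mul_zero, Nat.cast_zero, List.drop_zero, List.nil_append,
    if_pos rfl, if_true] at hB
  rw [hB]
  rw [state_eq _ 0 _ (by omega)]
  simp only [Nat.sub_zero]
  rw [← chunks_unfold]
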